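-- pv_equiv track=rewrite | github.com/woo0doo/Algorithm | 프로그래머스/unrated/181926. 수 조작하기 1/수 조작하기 1.py | solution
-- ===== SOURCE A (Python) =====
-- def solution(n, control):
--     for i in range(len(control)):
--         idx_str = control[i]
--         if idx_str == "w":
--             n += 1
--         elif idx_str == "s":
--             n -= 1
--         elif idx_str == "d":
--             n += 10
--         else:
--             n -= 10
--     return n
-- ===== SOURCE B (Python) =====
-- def solution(n, control):
--     w = control.count('w')
--     s = control.count('s')
--     d = control.count('d')
--     other = len(control) - w - s - d
--     return n + w - s + 10 * d - 10 * other
-- ===== Notes on version B (the rewrite author's own statement) =====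
-- stated objective: faster
-- what changed: Replaced the per-character branching loop by three str.count calls and one closed arithmetic formula (the 'else' count derived as len minus the three counts).
import Mathlib
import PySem

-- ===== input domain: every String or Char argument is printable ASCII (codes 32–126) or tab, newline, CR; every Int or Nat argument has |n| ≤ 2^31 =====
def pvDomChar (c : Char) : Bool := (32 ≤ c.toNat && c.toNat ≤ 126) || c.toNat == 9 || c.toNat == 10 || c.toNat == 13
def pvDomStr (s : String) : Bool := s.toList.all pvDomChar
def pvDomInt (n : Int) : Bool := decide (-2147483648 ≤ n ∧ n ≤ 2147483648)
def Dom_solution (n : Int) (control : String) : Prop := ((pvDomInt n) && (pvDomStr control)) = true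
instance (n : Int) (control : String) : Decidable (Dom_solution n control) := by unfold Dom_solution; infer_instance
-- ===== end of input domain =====

-- B replaces A's per-character branching loop by three str.count calls and one closed arithmetic formula (simpler).


-- ===== PORT A =====
-- A's loop 'for i in range(len(control)): idx_str = control[i]; …' visits each character
-- in order; ported as a fold over the character list carrying n, branches in A's order.
def solution (n : Int) (control : String) : Int :=
  control.toList.foldl
    (fun n idx_str =>
      if idx_str = 'w' then n + 1
      else if idx_str = 's' then n - 1
      else if idx_str = 'd' then n + 10
      else n - 10) n

-- ===== PORT B =====
def solution_alt (n : Int) (control : String) : Int :=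
  let w : Int := (PySem.Str.count control "w" : Int)
  let s : Int := (PySem.Str.count control "s" : Int)
  let d : Int := (PySem.Str.count control "d" : Int)
  let other : Int := PySem.Str.len control - w - s - d
  n + w - s + 10 * d - 10 * other

-- ===== PRECONDITION & SPEC =====
def Spec_solution (n : Int) (control : String) (out : Int) : Prop := out = solution_alt n control
instance (n : Int) (control : String) (out : Int) : Decidable (Spec_solution n control out) := by unfold Spec_solution; infer_instance

-- ===== CLAIM (what is proved, stated in full; the proofs are below) =====
def Claim_equal_solution : Prop := ∀ (n : Int) (control : String), Dom_solution n control → Spec_solution n control (solution n control)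

-- ===== LEMMAS AND PROOFS =====

-- Python's s.count(sub) for a single-character sub counts the occurrences of that character.
theorem chars_count_go_singleton (c : Char) (l : List Char) (fuel acc : Nat)
    (h : l.length ≤ fuel) :
    PySem.Chars.count.go [c] fuel l acc = acc + l.count c := by
  induction l generalizing fuel acc with
  | nil => cases fuel <;> simp [PySem.Chars.count.go]
  | cons hd t ih =>
    cases fuel with
    | zero => simp at h
    | succ f =>
      simp only [List.length_cons, Nat.succ_le_succ_iff] at h
      by_cases hc : c = hd
      · have : [c].isPrefixOf (hd :: t) = true := by simp [List.isPrefixOf, hc]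
        simp only [PySem.Chars.count.go, this, if_true, List.length_cons, List.length_nil,
          List.drop_succ_cons, List.drop_zero]
        rw [ih f (acc + 1) h]
        simp [List.count_cons, hc]
        omega
      · have : [c].isPrefixOf (hd :: t) = false := by
          simp [List.isPrefixOf]; exact fun h' => hc h'
        simp only [PySem.Chars.count.go, this, if_false]
        rw [ih f acc h]
        have hne : ¬ hd = c := fun h' => hc h'.symm
        simp [List.count_cons, hne]

theorem chars_count_singleton (c : Char) (cs : List Char) :
    PySem.Chars.count cs [c] = cs.count c := by
  have h := chars_count_go_singleton c cs cs.length 0 (le_refl _)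
  simpa [PySem.Chars.count] using h

-- A's fold equals the closed count formula, for any starting value of n.
theorem fold_eq_counts (l : List Char) (n : Int) :
    l.foldl
      (fun n idx_str =>
        if idx_str = 'w' then n + 1
        else if idx_str = 's' then n - 1
        else if idx_str = 'd' then n + 10
        else n - 10) n
    = n + (l.count 'w' : Int) - (l.count 's' : Int) + 10 * (l.count 'd' : Int)
        - 10 * ((l.length : Int) - (l.count 'w' : Int) - (l.count 's' : Int) - (l.count 'd' : Int)) := by
  induction l generalizing n with
  | nil => simp
  | cons hd t ih =>
    simp only [List.foldl_cons, List.count_cons, List.length_cons]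
    rw [ih]
    by_cases hw : hd = 'w'
    · simp [hw]; push_cast; ring_nf
    · by_cases hs : hd = 's'
      · simp [hs]; push_cast; ring_nf
      · by_cases hd' : hd = 'd'
        · simp [hd', hw, hs]; push_cast; ring_nf
        · simp [hw, hs, hd']; push_cast; ring_nf

-- ===== VERDICT (by name: the statement is the Claim_ definition above) =====
theorem solution_spec : Claim_equal_solution := by
  intro n control _
  unfold Spec_solution solution solution_alt
  simp only [PySem.Str.count_eq, PySem.Str.len_eq]
  rw [fold_eq_counts,
    show ("w" : String).toList = ['w'] from rfl,
    show ("s" : String).toList = ['s'] from rfl,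
    show ("d" : String).toList = ['d'] from rfl,
    chars_count_singleton, chars_count_singleton, chars_count_singleton]
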